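-- pv_equiv track=rewrite | github.com/therealkraus/learning | python/labs109.py | taxi_zum_zum
-- ===== SOURCE A (Python) =====
-- def taxi_zum_zum(moves):
--     x = 0
--     y = 0
--     direction = "n"
--     for m in moves:
--         if m == "L":
--             if direction == "e":
--                 direction = "n"
--             elif direction == "w":
--                 direction = "s"
--             elif direction == "n":
--                 direction = "w"
--             elif direction == "s":
--                 direction = "e"
--         elif m == "R":
--             if direction == "e":
--                 direction = "s"
--             elif direction == "w":
--                 direction = "n"
--             elif direction == "n":
--                 direction = "e"
--             elif direction == "s":
--                 direction = "w"
--         elif m == "F":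
--             if direction == "e":
--                 x += 1
--             elif direction == "w":
--                 x -= 1
--             elif direction == "n":
--                 y += 1
--             elif direction == "s":
--                 y -= 1
--     return (x, y)
-- ===== SOURCE B (Python) =====
-- def taxi_zum_zum(moves):
--     # Stage 1: running net-left-turn count before each move (prefix has len(moves)+1 entries).
--     prefix = [0]
--     t = 0
--     for m in moves:
--         t += (m == "L") - (m == "R")
--         prefix.append(t)
--     # Stage 2: each 'F' contributes the unit vector of the heading i^t; sum them up.
--     VEC = ((0, 1), (-1, 0), (0, -1), (1, 0))
--     x = sum(VEC[t % 4][0] for t, m in zip(prefix, moves) if m == "F")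
--     y = sum(VEC[t % 4][1] for t, m in zip(prefix, moves) if m == "F")
--     return (x, y)
-- ===== Notes on version B (the rewrite author's own statement) =====
-- stated objective: alternative
-- what changed: Replaces the stateful step-by-step simulation by two staged passes: first a prefix-sum list of net left turns, then a filtered sum over zip(prefix, moves) of mod-4 heading-table vectors at each forward move - no position or heading state is carried through a simulation.
import Mathlib
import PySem

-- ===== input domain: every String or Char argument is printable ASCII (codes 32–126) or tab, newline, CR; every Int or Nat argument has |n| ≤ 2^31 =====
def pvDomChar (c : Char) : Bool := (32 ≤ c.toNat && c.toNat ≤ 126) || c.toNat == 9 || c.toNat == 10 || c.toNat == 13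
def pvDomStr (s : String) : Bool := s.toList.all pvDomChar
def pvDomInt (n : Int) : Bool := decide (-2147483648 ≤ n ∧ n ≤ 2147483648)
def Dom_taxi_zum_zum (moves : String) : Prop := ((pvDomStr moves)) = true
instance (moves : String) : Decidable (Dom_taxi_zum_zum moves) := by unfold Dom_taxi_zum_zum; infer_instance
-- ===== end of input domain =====

-- B replaces A's stateful one-pass simulation by two staged passes (a prefix-sum list of net
-- left turns, then a filtered sum of mod-4 heading-table vectors over zip(prefix, moves));
-- same O(n) cost, no state carried through a simulation (objective: alternative).

-- ===== PORT A =====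
-- A: foldl over the characters with state (x, y, direction), branching on the direction string.
def taxiStepA (st : Int × Int × String) (m : Char) : Int × Int × String :=
  let (x, y, direction) := st
  if m = 'L' then
    if direction = "e" then (x, y, "n")
    else if direction = "w" then (x, y, "s")
    else if direction = "n" then (x, y, "w")
    else if direction = "s" then (x, y, "e")
    else (x, y, direction)
  else if m = 'R' then
    if direction = "e" then (x, y, "s")
    else if direction = "w" then (x, y, "n")
    else if direction = "n" then (x, y, "e")
    else if direction = "s" then (x, y, "w")
    else (x, y, direction)
  else if m = 'F' then
    if direction = "e" then (x + 1, y, direction)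
    else if direction = "w" then (x - 1, y, direction)
    else if direction = "n" then (x, y + 1, direction)
    else if direction = "s" then (x, y - 1, direction)
    else (x, y, direction)
  else (x, y, direction)

def taxi_zum_zum (moves : String) : Int × Int :=
  let st := moves.toList.foldl taxiStepA (0, 0, "n")
  (st.1, st.2.1)

-- ===== PORT B =====
-- B: pass 1 builds the prefix list of net left-turn counts; pass 2 sums the mod-4
-- heading-table vectors at each 'F' over zip(prefix, moves).
def taxiVecTbl : List (Int × Int) := [(0, 1), (-1, 0), (0, -1), (1, 0)]

-- VEC[t % 4]; the index is always in range 0..3, so the .getD default is never used.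
def taxiVec (t : Int) : Int × Int :=
  (PySem.List.pyGet? taxiVecTbl (PySem.Int.mod t 4)).getD (0, 0)

def taxi_zum_zum_alt (moves : String) : Int × Int :=
  let l := moves.toList
  let pr := (l.foldl (fun (st : List Int × Int) m =>
      let t := st.2 + ((if m = 'L' then (1 : Int) else 0) - (if m = 'R' then 1 else 0))
      (st.1 ++ [t], t)) ([0], 0)).1
  let pairs := pr.zip l
  let x := pairs.foldl (fun s p => if p.2 = 'F' then s + (taxiVec p.1).1 else s) 0
  let y := pairs.foldl (fun s p => if p.2 = 'F' then s + (taxiVec p.1).2 else s) 0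
  (x, y)

-- ===== PRECONDITION & SPEC =====
def Spec_taxi_zum_zum (moves : String) (out : Int × Int) : Prop := out = taxi_zum_zum_alt moves
instance (moves : String) (out : Int × Int) : Decidable (Spec_taxi_zum_zum moves out) := by unfold Spec_taxi_zum_zum; infer_instance

-- ===== CLAIM (what is proved, stated in full; the proofs are below) =====
def Claim_equal_taxi_zum_zum : Prop := ∀ (moves : String), Dom_taxi_zum_zum moves → Spec_taxi_zum_zum moves (taxi_zum_zum moves)

-- ===== LEMMAS AND PROOFS =====

def turnc (m : Char) : Int := (if m = 'L' then 1 else 0) - (if m = 'R' then 1 else 0)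

def prefList (t : Int) : List Char → List Int
  | [] => []
  | m :: ms => (t + turnc m) :: prefList (t + turnc m) ms

def disp (t : Int) : List Char → Int × Int
  | [] => (0, 0)
  | m :: ms =>
    if m = 'L' then disp (t + 1) ms
    else if m = 'R' then disp (t - 1) ms
    else if m = 'F' then
      ((taxiVec t).1 + (disp t ms).1, (taxiVec t).2 + (disp t ms).2)
    else disp t ms

def dirOf (t : Int) : String :=
  if t % 4 = 0 then "n" else if t % 4 = 1 then "w" else if t % 4 = 2 then "s" else "e"

theorem dirOf_eq0 (t : Int) (h : t % 4 = 0) : dirOf t = "n" := by unfold dirOf; rw [if_pos h]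
theorem dirOf_eq1 (t : Int) (h : t % 4 = 1) : dirOf t = "w" := by
  unfold dirOf; rw [if_neg (by omega), if_pos h]
theorem dirOf_eq2 (t : Int) (h : t % 4 = 2) : dirOf t = "s" := by
  unfold dirOf; rw [if_neg (by omega), if_neg (by omega), if_pos h]
theorem dirOf_eq3 (t : Int) (h : t % 4 = 3) : dirOf t = "e" := by
  unfold dirOf; rw [if_neg (by omega), if_neg (by omega), if_neg (by omega)]

theorem taxiVec_cases (t : Int) :
    taxiVec t = if t % 4 = 0 then ((0 : Int), (1 : Int))
      else if t % 4 = 1 then (-1, 0) else if t % 4 = 2 then (0, -1) else (1, 0) := by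
  unfold taxiVec
  rw [PySem.Int.mod_eq_emod_of_pos (by norm_num)]
  have h4 : t % 4 = 0 ∨ t % 4 = 1 ∨ t % 4 = 2 ∨ t % 4 = 3 := by omega
  rcases h4 with h | h | h | h <;> rw [h] <;> decide

theorem vec_eq0 (t : Int) (h : t % 4 = 0) : taxiVec t = (0, 1) := by
  rw [taxiVec_cases, if_pos h]
theorem vec_eq1 (t : Int) (h : t % 4 = 1) : taxiVec t = (-1, 0) := by
  rw [taxiVec_cases, if_neg (by omega), if_pos h]
theorem vec_eq2 (t : Int) (h : t % 4 = 2) : taxiVec t = (0, -1) := by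
  rw [taxiVec_cases, if_neg (by omega), if_neg (by omega), if_pos h]
theorem vec_eq3 (t : Int) (h : t % 4 = 3) : taxiVec t = (1, 0) := by
  rw [taxiVec_cases, if_neg (by omega), if_neg (by omega), if_neg (by omega)]

theorem stepL (x y t : Int) : taxiStepA (x, y, dirOf t) 'L' = (x, y, dirOf (t + 1)) := by
  have h4 : t % 4 = 0 ∨ t % 4 = 1 ∨ t % 4 = 2 ∨ t % 4 = 3 := by omega
  rcases h4 with h | h | h | h
  · rw [dirOf_eq0 t h, dirOf_eq1 (t + 1) (by omega)]; simp [taxiStepA]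
  · rw [dirOf_eq1 t h, dirOf_eq2 (t + 1) (by omega)]; simp [taxiStepA]
  · rw [dirOf_eq2 t h, dirOf_eq3 (t + 1) (by omega)]; simp [taxiStepA]
  · rw [dirOf_eq3 t h, dirOf_eq0 (t + 1) (by omega)]; simp [taxiStepA]

theorem stepR (x y t : Int) : taxiStepA (x, y, dirOf t) 'R' = (x, y, dirOf (t - 1)) := by
  have h4 : t % 4 = 0 ∨ t % 4 = 1 ∨ t % 4 = 2 ∨ t % 4 = 3 := by omega
  rcases h4 with h | h | h | h
  · rw [dirOf_eq0 t h, dirOf_eq3 (t - 1) (by omega)]; simp [taxiStepA]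
  · rw [dirOf_eq1 t h, dirOf_eq0 (t - 1) (by omega)]; simp [taxiStepA]
  · rw [dirOf_eq2 t h, dirOf_eq1 (t - 1) (by omega)]; simp [taxiStepA]
  · rw [dirOf_eq3 t h, dirOf_eq2 (t - 1) (by omega)]; simp [taxiStepA]

theorem stepF (x y t : Int) :
    taxiStepA (x, y, dirOf t) 'F' = (x + (taxiVec t).1, y + (taxiVec t).2, dirOf t) := by
  have h4 : t % 4 = 0 ∨ t % 4 = 1 ∨ t % 4 = 2 ∨ t % 4 = 3 := by omega
  rcases h4 with h | h | h | h
  · rw [vec_eq0 t h, dirOf_eq0 t h]; simp [taxiStepA, Prod.mk.injEq]; try omega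
  · rw [vec_eq1 t h, dirOf_eq1 t h]; simp [taxiStepA, Prod.mk.injEq]; try omega
  · rw [vec_eq2 t h, dirOf_eq2 t h]; simp [taxiStepA, Prod.mk.injEq]; try omega
  · rw [vec_eq3 t h, dirOf_eq3 t h]; simp [taxiStepA, Prod.mk.injEq]; try omega

theorem stepO (x y t : Int) (m : Char) (hL : ¬ m = 'L') (hR : ¬ m = 'R') (hF : ¬ m = 'F') :
    taxiStepA (x, y, dirOf t) m = (x, y, dirOf t) := by
  simp [taxiStepA, hL, hR, hF]

theorem lemA (l : List Char) : ∀ (t x y : Int),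
    ∃ d, l.foldl taxiStepA (x, y, dirOf t) = (x + (disp t l).1, y + (disp t l).2, d) := by
  induction l with
  | nil => intro t x y; exact ⟨dirOf t, by simp [disp]⟩
  | cons m ms ih =>
    intro t x y
    by_cases hL : m = 'L'
    · subst hL
      obtain ⟨d, hd⟩ := ih (t + 1) x y
      refine ⟨d, ?_⟩
      rw [List.foldl_cons, stepL, hd]
      simp [disp]
    · by_cases hR : m = 'R'
      · subst hR
        obtain ⟨d, hd⟩ := ih (t - 1) x y
        refine ⟨d, ?_⟩
        rw [List.foldl_cons, stepR, hd]
        simp [disp]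
      · by_cases hF : m = 'F'
        · subst hF
          obtain ⟨d, hd⟩ := ih t (x + (taxiVec t).1) (y + (taxiVec t).2)
          refine ⟨d, ?_⟩
          rw [List.foldl_cons, stepF, hd]
          simp [disp, Prod.mk.injEq]
          constructor <;> ring
        · obtain ⟨d, hd⟩ := ih t x y
          refine ⟨d, ?_⟩
          rw [List.foldl_cons, stepO x y t m hL hR hF, hd]
          simp [disp, hL, hR, hF]

theorem buildSpec (l : List Char) : ∀ (acc : List Int) (t : Int),
    (l.foldl (fun (st : List Int × Int) m =>
      let t := st.2 + ((if m = 'L' then (1 : Int) else 0) - (if m = 'R' then 1 else 0))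
      (st.1 ++ [t], t)) (acc, t)).1 = acc ++ prefList t l := by
  induction l with
  | nil => intro acc t; simp [prefList]
  | cons m ms ih =>
    intro acc t
    simp only [List.foldl_cons, prefList]
    rw [ih]
    simp [turnc]

theorem lemBx (l : List Char) : ∀ (t s : Int),
    (((t :: prefList t l).zip l).foldl
        (fun s p => if p.2 = 'F' then s + (taxiVec p.1).1 else s) s) = s + (disp t l).1 := by
  induction l with
  | nil => intro t s; simp [disp]
  | cons m ms ih =>
    intro t s
    simp only [prefList, List.zip_cons_cons, List.foldl_cons]
    by_cases hL : m = 'L'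
    · subst hL
      rw [show turnc 'L' = 1 from by decide, if_neg (by decide), ih]
      simp [disp]
    · by_cases hR : m = 'R'
      · subst hR
        rw [show turnc 'R' = -1 from by decide, show t + -1 = t - 1 from by ring,
          if_neg (by decide), ih]
        simp [disp]
      · by_cases hF : m = 'F'
        · subst hF
          rw [show turnc 'F' = 0 from by decide, add_zero, if_pos rfl, ih]
          simp [disp]
          omega
        · rw [show turnc m = 0 from by simp [turnc, hL, hR], add_zero, if_neg hF, ih]
          simp [disp, hL, hR, hF]

theorem lemBy (l : List Char) : ∀ (t s : Int),
    (((t :: prefList t l).zip l).foldl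
        (fun s p => if p.2 = 'F' then s + (taxiVec p.1).2 else s) s) = s + (disp t l).2 := by
  induction l with
  | nil => intro t s; simp [disp]
  | cons m ms ih =>
    intro t s
    simp only [prefList, List.zip_cons_cons, List.foldl_cons]
    by_cases hL : m = 'L'
    · subst hL
      rw [show turnc 'L' = 1 from by decide, if_neg (by decide), ih]
      simp [disp]
    · by_cases hR : m = 'R'
      · subst hR
        rw [show turnc 'R' = -1 from by decide, show t + -1 = t - 1 from by ring,
          if_neg (by decide), ih]
        simp [disp]
      · by_cases hF : m = 'F'
        · subst hF
          rw [show turnc 'F' = 0 from by decide, add_zero, if_pos rfl, ih]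
          simp [disp]
          omega
        · rw [show turnc m = 0 from by simp [turnc, hL, hR], add_zero, if_neg hF, ih]
          simp [disp, hL, hR, hF]

-- ===== VERDICT (by name: the statement is the Claim_ definition above) =====
theorem taxi_zum_zum_spec : Claim_equal_taxi_zum_zum := by
  intro moves _
  unfold Spec_taxi_zum_zum
  obtain ⟨d, hd⟩ := lemA moves.toList 0 0 0
  rw [dirOf_eq0 0 (by decide)] at hd
  simp only [taxi_zum_zum, taxi_zum_zum_alt]
  rw [buildSpec moves.toList [0] 0, hd]
  simp only [List.singleton_append]
  rw [lemBx moves.toList 0 0, lemBy moves.toList 0 0]
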